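-- pv_equiv track=rewrite | github.com/ni-lie/OpSystem_5 | output/results.py | get_relevant_lines
-- ===== SOURCE A (Python) =====
-- from typing import Sequence, TypedDict
--
-- def get_relevant_lines(lines: Sequence[str]) -> Sequence[str]:
--     lines = [line for line in lines
--              if line.strip() != ''
--              and not line.startswith('qemu')
--              and 'SeaBIOS' not in line
--              and not line.startswith('iPXE')
--              and not line.startswith('Press ')
--              and not line.startswith('Booting ')
--              and not line.startswith('cpu0:')
--              and not line.startswith('sb:')
--              and not line.startswith('init:')
--              and not line.startswith('xv6...')
--              and not line.startswith('$ ')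
--              and "[3]*test:4" not in line
--              and "[4]*test:4" not in line
--              and "[5]*test:4" not in line]
--
--     last_idx = None
--
--     for idx, line in list(enumerate(lines))[::-1]:
--         if '[2]*test:4' in line:
--             last_idx = idx
--             break
--
--     if last_idx is not None:
--         lines = lines[:last_idx+1]
--
--     return lines
-- ===== SOURCE B (Python) =====
-- def get_relevant_lines(lines):
--     # One reversed pass: skip filtered-out lines; once the last '[2]*test:4'
--     # marker is seen (first in reversed order), reset the output to start there.
--     out = []
--     saw = False
--     for line in reversed(lines):
--         if (line.strip() == ''
--                 or line.startswith('qemu')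
--                 or 'SeaBIOS' in line
--                 or line.startswith('iPXE')
--                 or line.startswith('Press ')
--                 or line.startswith('Booting ')
--                 or line.startswith('cpu0:')
--                 or line.startswith('sb:')
--                 or line.startswith('init:')
--                 or line.startswith('xv6...')
--                 or line.startswith('$ ')
--                 or '[3]*test:4' in line
--                 or '[4]*test:4' in line
--                 or '[5]*test:4' in line):
--             continue
--         if saw:
--             out.append(line)
--         elif '[2]*test:4' in line:
--             out = [line]
--             saw = True
--         else:
--             out.append(line)
--     out.reverse()
--     return out
-- ===== Notes on version B (the rewrite author's own statement) =====
-- stated objective: simpler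
-- what changed: A builds a filtered list, then does a separate reverse scan over enumerate() to find the last '[2]*test:4' marker and slices; B does one reversed pass that skips filtered lines and resets the accumulated output when it first meets the marker, so no indices, enumerate or slicing are needed.
import Mathlib
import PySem

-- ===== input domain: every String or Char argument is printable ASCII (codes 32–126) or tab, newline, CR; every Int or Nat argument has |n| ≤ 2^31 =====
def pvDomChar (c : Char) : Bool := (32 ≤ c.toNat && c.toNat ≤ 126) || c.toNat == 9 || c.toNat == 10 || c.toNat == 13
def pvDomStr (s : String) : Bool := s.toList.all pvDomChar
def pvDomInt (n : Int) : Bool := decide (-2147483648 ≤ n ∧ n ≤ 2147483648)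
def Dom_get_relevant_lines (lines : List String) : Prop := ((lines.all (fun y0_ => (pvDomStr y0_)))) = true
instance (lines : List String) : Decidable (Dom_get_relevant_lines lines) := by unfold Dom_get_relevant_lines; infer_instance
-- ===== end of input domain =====

-- B replaces A's filter-comprehension + separate reverse index scan + slice by ONE reversed pass
-- that resets the output at the last '[2]*test:4' marker (objective: simpler, no index arithmetic).

def pvMark (line : String) : Bool := PySem.Str.isIn "[2]*test:4" line

-- ===== PORT A =====
-- the comprehension's guard (a conjunction of negated tests, as in A)
def pvKeep (line : String) : Bool :=
  !(PySem.Str.strip line == "")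
  && !PySem.Str.startswith line "qemu"
  && !PySem.Str.isIn "SeaBIOS" line
  && !PySem.Str.startswith line "iPXE"
  && !PySem.Str.startswith line "Press "
  && !PySem.Str.startswith line "Booting "
  && !PySem.Str.startswith line "cpu0:"
  && !PySem.Str.startswith line "sb:"
  && !PySem.Str.startswith line "init:"
  && !PySem.Str.startswith line "xv6..."
  && !PySem.Str.startswith line "$ "
  && !PySem.Str.isIn "[3]*test:4" line
  && !PySem.Str.isIn "[4]*test:4" line
  && !PySem.Str.isIn "[5]*test:4" line

def get_relevant_lines (lines : List String) : List String :=
  let lines1 := lines.filter pvKeep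
  -- 'for idx, line in list(enumerate(lines))[::-1]: if marker in line: last_idx = idx; break'
  let last_idx : Option Int :=
    match (PySem.List.enumerate lines1 0).reverse.find? (fun p => pvMark p.2) with
    | some p => some p.1
    | none => none
  match last_idx with
  | some idx => PySem.List.slice lines1 none (some (idx + 1))
  | none => lines1

-- ===== PORT B =====
-- the 'continue' guard (a disjunction of tests, as in B)
def pvDrop (line : String) : Bool :=
  (PySem.Str.strip line == "")
  || PySem.Str.startswith line "qemu"
  || PySem.Str.isIn "SeaBIOS" line
  || PySem.Str.startswith line "iPXE"
  || PySem.Str.startswith line "Press "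
  || PySem.Str.startswith line "Booting "
  || PySem.Str.startswith line "cpu0:"
  || PySem.Str.startswith line "sb:"
  || PySem.Str.startswith line "init:"
  || PySem.Str.startswith line "xv6..."
  || PySem.Str.startswith line "$ "
  || PySem.Str.isIn "[3]*test:4" line
  || PySem.Str.isIn "[4]*test:4" line
  || PySem.Str.isIn "[5]*test:4" line

-- one iteration of B's reversed loop; state = (out, saw)
def pvAltStep (st : List String × Bool) (line : String) : List String × Bool :=
  if pvDrop line then st
  else if st.2 then (st.1 ++ [line], st.2)
  else if pvMark line then ([line], true)
  else (st.1 ++ [line], false)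

def get_relevant_lines_alt (lines : List String) : List String :=
  (lines.reverse.foldl pvAltStep ([], false)).1.reverse

-- ===== PRECONDITION & SPEC =====
def Spec_get_relevant_lines (lines : List String) (out : List String) : Prop := out = get_relevant_lines_alt lines
instance (lines : List String) (out : List String) : Decidable (Spec_get_relevant_lines lines out) := by unfold Spec_get_relevant_lines; infer_instance

-- ===== CLAIM (what is proved, stated in full; the proofs are below) =====
def Claim_equal_get_relevant_lines : Prop := ∀ (lines : List String), Dom_get_relevant_lines lines → Spec_get_relevant_lines lines (get_relevant_lines lines)

-- ===== LEMMAS AND PROOFS =====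

theorem pvKeep_eq_not_drop (l : String) : pvKeep l = !pvDrop l := by
  simp [pvKeep, pvDrop]

theorem pv_foldl_filter (xs : List String) (st : List String × Bool) :
    xs.foldl pvAltStep st = (xs.filter pvKeep).foldl pvAltStep st := by
  induction xs generalizing st with
  | nil => rfl
  | cons x xs ih =>
    by_cases h : pvDrop x
    · have hk : pvKeep x = false := by simp [pvKeep_eq_not_drop, h]
      simp [hk, List.foldl_cons, pvAltStep, h, ih]
    · have hk : pvKeep x = true := by simp [pvKeep_eq_not_drop, h]
      simp [hk, List.foldl_cons, ih]

theorem pv_foldl_saw (R : List String) (out : List String)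
    (h : ∀ l ∈ R, pvDrop l = false) :
    R.foldl pvAltStep (out, true) = (out ++ R, true) := by
  induction R generalizing out with
  | nil => simp
  | cons l R ih =>
    have hd : pvDrop l = false := h l (by simp)
    have : pvAltStep (out, true) l = (out ++ [l], true) := by
      simp [pvAltStep, hd]
    rw [List.foldl_cons, this, ih (out ++ [l]) (fun x hx => h x (by simp [hx]))]
    simp

theorem pv_foldl_unsaw (R : List String) (out : List String)
    (h : ∀ l ∈ R, pvDrop l = false) :
    R.foldl pvAltStep (out, false) =
      if R.any pvMark then (R.drop (R.findIdx pvMark), true) else (out ++ R, false) := by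
  induction R generalizing out with
  | nil => simp
  | cons l R ih =>
    have hd : pvDrop l = false := h l (by simp)
    have htail : ∀ x ∈ R, pvDrop x = false := fun x hx => h x (by simp [hx])
    by_cases m : pvMark l
    · have : pvAltStep (out, false) l = ([l], true) := by simp [pvAltStep, hd, m]
      rw [List.foldl_cons, this, pv_foldl_saw R [l] htail]
      simp [m, List.findIdx_cons]
    · have : pvAltStep (out, false) l = (out ++ [l], false) := by
        simp [pvAltStep, hd, m]
      rw [List.foldl_cons, this, ih (out ++ [l]) htail]
      by_cases hm : R.any pvMark
      · simp [hm, List.any_cons, m, List.findIdx_cons]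
      · simp [hm, List.any_cons, m]

theorem pv_find_none (F : List String) (h : F.any pvMark = false) :
    (PySem.List.enumerate F 0).reverse.find? (fun p => pvMark p.2) = none := by
  rw [List.find?_eq_none]
  intro p hp
  rw [List.mem_reverse, PySem.List.mem_enumerate_iff] at hp
  obtain ⟨k, hk, rfl⟩ := hp
  have := List.any_eq_false.mp h (F[k]) (by simp)
  simpa using this

theorem pv_find_last (F : List String) (h : F.reverse.any pvMark = true) :
    ∃ l, (PySem.List.enumerate F 0).reverse.find? (fun p => pvMark p.2) =
      some (((F.length - 1 - F.reverse.findIdx pvMark : Nat) : Int), l) := by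
  induction F using List.reverseRecOn with
  | nil => simp at h
  | append_singleton F x ih =>
    rw [PySem.List.enumerate_append]
    have h1 : PySem.List.enumerate [x] (0 + (F.length : Int)) = [((F.length : Int), x)] := by
      simp [PySem.List.enumerate_cons, PySem.List.enumerate_nil]
    rw [h1, List.reverse_append]
    simp only [List.reverse_singleton, List.singleton_append, List.find?_cons]
    rw [List.reverse_append, List.reverse_singleton, List.singleton_append] at h ⊢
    by_cases m : pvMark x
    · refine ⟨x, ?_⟩
      simp only [m, List.findIdx_cons, cond_true]
      have : (F ++ [x]).length - 1 - 0 = F.length := by simp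
      rw [this]
    · simp only [List.any_cons, m, Bool.false_or] at h
      obtain ⟨l, hl⟩ := ih h
      refine ⟨l, ?_⟩
      simp only [m, cond_false, List.findIdx_cons]
      have : (F ++ [x]).length - 1 - (F.reverse.findIdx pvMark + 1)
           = F.length - 1 - F.reverse.findIdx pvMark := by
        simp [List.length_append]; omega
      rw [this, hl]

-- ===== VERDICT (by name: the statement is the Claim_ definition above) =====
theorem pvA_eq (lines : List String) :
    get_relevant_lines lines =
      (match (match (PySem.List.enumerate (lines.filter pvKeep) 0).reverse.find? (fun p => pvMark p.2) with
              | some p => some p.1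
              | none => none) with
       | some idx => PySem.List.slice (lines.filter pvKeep) none (some (idx + 1))
       | none => lines.filter pvKeep) := rfl

theorem get_relevant_lines_spec : Claim_equal_get_relevant_lines := by
  intro lines _
  unfold Spec_get_relevant_lines get_relevant_lines_alt
  rw [pvA_eq lines]
  set F := lines.filter pvKeep with hF
  have hfilt : lines.reverse.filter pvKeep = F.reverse := by
    rw [hF, List.filter_reverse]
  have hmem : ∀ l ∈ F.reverse, pvDrop l = false := by
    intro l hl
    rw [List.mem_reverse, hF, List.mem_filter] at hl
    have := hl.2
    rw [pvKeep_eq_not_drop] at this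
    simpa using this
  rw [pv_foldl_filter, hfilt, pv_foldl_unsaw F.reverse [] hmem]
  by_cases hm : F.reverse.any pvMark
  · obtain ⟨l, hl⟩ := pv_find_last F hm
    rw [hl]
    have hj : F.reverse.findIdx pvMark < F.length := by
      have hex : ∃ x ∈ F.reverse, pvMark x = true := List.any_eq_true.mp hm
      have := List.findIdx_lt_length.mpr hex
      simpa using this
    simp only [hm, if_true]
    have hcast : ((F.length - 1 - F.reverse.findIdx pvMark : Nat) : Int) + 1
        = ((F.length - F.reverse.findIdx pvMark : Nat) : Int) := by
      push_cast [Nat.sub_sub]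
      omega
    rw [hcast, PySem.List.slice_to_natCast]
    rw [List.reverse_drop]
    simp
  · have hm' : F.any pvMark = false := by
      rw [List.any_reverse] at hm
      simpa using hm
    rw [pv_find_none F hm']
    simp [hm]
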